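-- pv_equiv track=rewrite | github.com/Hayle-HB/A2SV-commutative-Programming | Source and sink.py | sorce_sink
-- ===== SOURCE A (Python) =====
-- def sorce_sink(n, adj_matrix):
--     sources = []
--     sinks = []
--
--
--     for i in range(n):
--         is_source = True
--         for j in range(n):
--             if adj_matrix[j][i] == 1:
--                 is_source = False
--                 break
--         if is_source:
--             sources.append(i + 1)
--
--     for i in range(n):
--         is_sink = True
--         for j in range(n):
--             if adj_matrix[i][j] == 1:
--                 is_sink = False
--                 break
--         if is_sink:
--             sinks.append(i + 1)
--
--     return sources, sinks
-- ===== SOURCE B (Python) =====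
-- def sorce_sink(n, adj_matrix):
--     m = max(n, 0)
--     in_count = [0] * m
--     out_count = [0] * m
--     for i in range(n):
--         row = adj_matrix[i]
--         for j in range(n):
--             if row[j] == 1:
--                 out_count[i] += 1
--                 in_count[j] += 1
--     sources = [i + 1 for i in range(n) if in_count[i] == 0]
--     sinks = [i + 1 for i in range(n) if out_count[i] == 0]
--     return sources, sinks
-- ===== Notes on version B (the rewrite author's own statement) =====
-- stated objective: alternative
-- what changed: Replaces A's two existence-scans with early break (one per vertex, per direction) by a single nested pass that tallies in-degree and out-degree arrays, followed by two filtering passes over the tallies.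
-- outside the precondition, e.g. on sorce_sink(2, [[1, 1], [1]]): A returns ([], []), B raises IndexError
import Mathlib
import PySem

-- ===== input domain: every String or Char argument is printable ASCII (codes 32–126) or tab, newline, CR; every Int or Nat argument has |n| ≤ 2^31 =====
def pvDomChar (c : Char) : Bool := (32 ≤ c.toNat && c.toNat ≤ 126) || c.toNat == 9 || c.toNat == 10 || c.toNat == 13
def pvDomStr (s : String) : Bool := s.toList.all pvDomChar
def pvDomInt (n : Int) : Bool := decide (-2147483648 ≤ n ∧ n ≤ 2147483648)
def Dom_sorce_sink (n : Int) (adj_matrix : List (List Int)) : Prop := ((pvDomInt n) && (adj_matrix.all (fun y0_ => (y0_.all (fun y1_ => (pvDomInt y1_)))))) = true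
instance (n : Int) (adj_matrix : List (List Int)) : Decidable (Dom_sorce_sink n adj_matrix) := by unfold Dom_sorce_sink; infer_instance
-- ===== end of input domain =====

-- B tallies in-/out-degree arrays in one nested pass, then filters; A does per-vertex existence scans with early break.
-- Equivalence is about the return value; neither program mutates its arguments.

-- ===== PORT A =====
-- adj_matrix[a][b]; the getD defaults are only reached outside Pre_ (where Python raises IndexError)
def pvMatA (adj : List (List Int)) (a b : Int) : Int :=
  PySem.List.pyGetD (PySem.List.pyGetD adj a []) b 0

-- the inner 'for j ...: if f j == 1: flag = False; break' loop of A
def pvScanA (f : Int → Int) : List Int → Bool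
  | [] => true
  | j :: js => if f j == 1 then false else pvScanA f js

def sorce_sink (n : Int) (adj_matrix : List (List Int)) : List Int × List Int :=
  let sources := (PySem.List.pyRange 0 n 1).foldl
    (fun acc i => if pvScanA (fun j => pvMatA adj_matrix j i) (PySem.List.pyRange 0 n 1)
                  then acc ++ [i + 1] else acc) []
  let sinks := (PySem.List.pyRange 0 n 1).foldl
    (fun acc i => if pvScanA (fun j => pvMatA adj_matrix i j) (PySem.List.pyRange 0 n 1)
                  then acc ++ [i + 1] else acc) []
  (sources, sinks)

-- ===== PORT B =====
-- 'c[k] += 1' on a Python list; k comes from range(n), hence k = (k:Int).toNat exactly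
def pvBump (c : List Int) (k : Nat) : List Int :=
  c.set k (c.getD k 0 + 1)

def sorce_sink_alt (n : Int) (adj_matrix : List (List Int)) : List Int × List Int :=
  let m := (max n 0).toNat
  let st := (PySem.List.pyRange 0 n 1).foldl
    (fun (st : List Int × List Int) i =>
      let row := PySem.List.pyGetD adj_matrix i []
      (PySem.List.pyRange 0 n 1).foldl
        (fun (st : List Int × List Int) j =>
          if PySem.List.pyGetD row j 0 == 1 then
            (pvBump st.1 j.toNat, pvBump st.2 i.toNat)
          else st) st)
    (List.replicate m (0 : Int), List.replicate m (0 : Int))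
  (((PySem.List.pyRange 0 n 1).filter (fun i => st.1.getD i.toNat 0 == 0)).map (· + 1),
   ((PySem.List.pyRange 0 n 1).filter (fun i => st.2.getD i.toNat 0 == 0)).map (· + 1))

-- ===== PRECONDITION & SPEC =====
-- Pre_ excludes inputs where the Python programs hit a row index or entry index out of range:
-- there Python A either raises IndexError or (on some ragged matrices) is saved only by its early
-- break, while B's full tally pass raises IndexError.
def Pre_sorce_sink (n : Int) (adj_matrix : List (List Int)) : Prop :=
  n ≤ (adj_matrix.length : Int) ∧ ∀ row ∈ adj_matrix.take n.toNat, n ≤ (row.length : Int)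
instance (n : Int) (adj_matrix : List (List Int)) : Decidable (Pre_sorce_sink n adj_matrix) := by
  unfold Pre_sorce_sink; infer_instance

def pvWitness_sorce_sink : Int × List (List Int) := (2, [[0, 1], [0, 0]])

def Spec_sorce_sink (n : Int) (adj_matrix : List (List Int)) (out : List Int × List Int) : Prop := out = sorce_sink_alt n adj_matrix
instance (n : Int) (adj_matrix : List (List Int)) (out : List Int × List Int) : Decidable (Spec_sorce_sink n adj_matrix out) := by unfold Spec_sorce_sink; infer_instance

-- ===== CLAIM (what is proved, stated in full; the proofs are below) =====
def Claim_equal_sorce_sink : Prop := ∀ (n : Int) (adj_matrix : List (List Int)), Dom_sorce_sink n adj_matrix → Pre_sorce_sink n adj_matrix → Spec_sorce_sink n adj_matrix (sorce_sink n adj_matrix)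

-- ===== LEMMAS AND PROOFS =====

-- proof-only names for the two tally loops of port B (over Nat indices)
def pvInner (q : Nat → Bool) (i : Nat) (js : List Nat) (st : List Int × List Int) :
    List Int × List Int :=
  js.foldl (fun st j => if q j then (pvBump st.1 j, pvBump st.2 i) else st) st

def pvOuter (Q : Nat → Nat → Bool) (N : Nat) (is : List Nat) (st : List Int × List Int) :
    List Int × List Int :=
  is.foldl (fun st i => pvInner (Q i) i (List.range N) st) st

theorem pv_foldl_congr {α β : Type} (l : List β) (f g : α → β → α) (a : α)
    (h : ∀ acc, ∀ x ∈ l, f acc x = g acc x) : l.foldl f a = l.foldl g a := by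
  induction l generalizing a with
  | nil => rfl
  | cons x xs ih =>
    simp only [List.foldl_cons]
    rw [h a x (by simp)]
    exact ih _ (fun acc y hy => h acc y (by simp [hy]))

theorem pvBump_length (c : List Int) (k : Nat) : (pvBump c k).length = c.length := by
  simp [pvBump]

theorem pvBump_getD (c : List Int) (k k' : Nat) :
    (pvBump c k).getD k' 0 = if k' = k ∧ k < c.length then c.getD k' 0 + 1 else c.getD k' 0 := by
  simp only [pvBump, List.getD_eq_getElem?_getD, List.getElem?_set]
  split_ifs with h1 h2 h3 <;> simp_all

theorem pvInner_spec (q : Nat → Bool) (i : Nat) (js : List Nat) (c1 c2 : List Int) (k : Nat)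
    (hi : i < c2.length) (hjs : ∀ j ∈ js, j < c1.length) :
    (pvInner q i js (c1, c2)).1.getD k 0 = c1.getD k 0 + ((js.filter q).count k : Int) ∧
    (pvInner q i js (c1, c2)).2.getD k 0
      = c2.getD k 0 + (if i = k then ((js.countP q : Int)) else 0) ∧
    (pvInner q i js (c1, c2)).1.length = c1.length ∧
    (pvInner q i js (c1, c2)).2.length = c2.length := by
  induction js generalizing c1 c2 with
  | nil => simp [pvInner]
  | cons j js ih =>
    by_cases hq : q j
    · have hj : j < c1.length := hjs j (by simp)
      have hstep : pvInner q i (j :: js) (c1, c2) = pvInner q i js (pvBump c1 j, pvBump c2 i) := by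
        simp [pvInner, hq]
      obtain ⟨h1, h2, h3, h4⟩ := ih (pvBump c1 j) (pvBump c2 i) (by simpa [pvBump_length])
        (fun x hx => by rw [pvBump_length]; exact hjs x (by simp [hx]))
      rw [hstep]
      refine ⟨?_, ?_, by simpa [pvBump_length] using h3, by simpa [pvBump_length] using h4⟩
      · rw [h1, pvBump_getD, List.filter_cons, if_pos hq, List.count_cons]
        by_cases h : k = j
        · subst h; simp [hj]; omega
        · have h' : ¬ (j = k) := fun hh => h hh.symm
          simp [h, h']
      · rw [h2, pvBump_getD, List.countP_cons, if_pos hq]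
        by_cases h : i = k
        · subst h; simp [hi]; ring
        · have h' : ¬ (k = i) := fun hh => h hh.symm
          simp [h, h']
    · have hstep : pvInner q i (j :: js) (c1, c2) = pvInner q i js (c1, c2) := by
        simp [pvInner, hq]
      rw [hstep]
      obtain ⟨h1, h2, h3, h4⟩ := ih c1 c2 hi (fun x hx => hjs x (by simp [hx]))
      refine ⟨by simpa [hq] using h1, ?_, h3, h4⟩
      rw [h2, List.countP_cons]
      simp [hq]

theorem pvOuter_spec (Q : Nat → Nat → Bool) (N : Nat) (is : List Nat) (c1 c2 : List Int) (k : Nat)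
    (hk : k < N) (hlen1 : c1.length = N) (hlen2 : c2.length = N) (his : ∀ i ∈ is, i < N) :
    (pvOuter Q N is (c1, c2)).1.getD k 0
      = c1.getD k 0 + ((is.filter (fun i => Q i k)).length : Int) ∧
    (pvOuter Q N is (c1, c2)).2.getD k 0
      = c2.getD k 0 + ((is.count k : Int)) * (((List.range N).countP (Q k) : Int)) ∧
    (pvOuter Q N is (c1, c2)).1.length = N ∧
    (pvOuter Q N is (c1, c2)).2.length = N := by
  induction is generalizing c1 c2 with
  | nil => simp [pvOuter, hlen1, hlen2]
  | cons i is ih =>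
    have hi : i < c2.length := by rw [hlen2]; exact his i (by simp)
    obtain ⟨h1, h2, h3, h4⟩ := pvInner_spec (Q i) i (List.range N) c1 c2 k hi
      (fun j hj => by rw [hlen1]; simpa using hj)
    have hstep : pvOuter Q N (i :: is) (c1, c2)
        = pvOuter Q N is (pvInner (Q i) i (List.range N) (c1, c2)) := by
      simp [pvOuter, pvInner]
    obtain ⟨g1, g2, g3, g4⟩ := ih (pvInner (Q i) i (List.range N) (c1, c2)).1
      (pvInner (Q i) i (List.range N) (c1, c2)).2
      (by rw [h3, hlen1]) (by rw [h4, hlen2]) (fun x hx => his x (by simp [hx]))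
    rw [hstep]
    refine ⟨?_, ?_, g3, g4⟩
    · have hcount : ((List.range N).filter (Q i)).count k = if Q i k then 1 else 0 := by
        by_cases h : Q i k
        · rw [if_pos h, List.count_filter h, List.Nodup.count List.nodup_range]
          simp [hk]
        · rw [if_neg h, List.count_eq_zero]
          simp [List.mem_filter, h]
      rw [g1, h1, hcount, List.filter_cons]
      by_cases h : Q i k
      · rw [if_pos h, if_pos h, List.length_cons]
        push_cast
        ring
      · rw [if_neg h, if_neg h]
        push_cast
        ring
    · rw [g2, h2, List.count_cons]
      by_cases h : i = k
      · subst h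
        simp only [BEq.rfl, if_true]
        push_cast
        ring
      · simp only [beq_iff_eq, h, if_false]
        push_cast
        ring

theorem pvScanA_eq_all (f : Int → Int) (js : List Int) :
    pvScanA f js = js.all (fun j => !(f j == 1)) := by
  induction js with
  | nil => rfl
  | cons j js ih => by_cases h : f j == 1 <;> simp [pvScanA, h, ih]

theorem pv_len_beq_zero (l : List Nat) (p : Nat → Bool) :
    ((((l.filter p).length : Nat) : Int) == 0) = l.all (fun x => ! p x) := by
  rw [Bool.eq_iff_iff]
  simp [List.length_eq_zero_iff, List.filter_eq_nil_iff, List.all_eq_true]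

-- ===== VERDICT (by name: the statement is the Claim_ definition above) =====
theorem sorce_sink_spec : Claim_equal_sorce_sink := by
  intro n adj _ _
  unfold Spec_sorce_sink
  simp only [sorce_sink, sorce_sink_alt]
  by_cases hn : n ≤ 0
  · simp [PySem.List.pyRange_one_eq_nil hn]
  · rw [Int.not_le] at hn
    have hm : (max n 0).toNat = n.toNat := by omega
    have hr : PySem.List.pyRange 0 n 1 = (List.range n.toNat).map (fun k : Nat => (k : Int)) := by
      rw [PySem.List.pyRange_one]
      have h0 : ((n : Int) - 0).toNat = n.toNat := by omega
      rw [h0]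
      exact List.map_congr_left (fun a _ => by simp)
    set N := n.toNat with hN
    set Q : Nat → Nat → Bool := fun a b => pvMatA adj (a : Int) (b : Int) == 1 with hQ
    have hfold : (PySem.List.pyRange 0 n 1).foldl
        (fun (st : List Int × List Int) i =>
          (PySem.List.pyRange 0 n 1).foldl
            (fun (st : List Int × List Int) j =>
              if PySem.List.pyGetD (PySem.List.pyGetD adj i []) j 0 == 1 then
                (pvBump st.1 j.toNat, pvBump st.2 i.toNat) else st) st)
        (List.replicate N (0 : Int), List.replicate N (0 : Int))
      = pvOuter Q N (List.range N) (List.replicate N 0, List.replicate N 0) := by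
      rw [hr, List.foldl_map]
      unfold pvOuter pvInner
      apply pv_foldl_congr
      intro st i _
      rw [List.foldl_map]
      apply pv_foldl_congr
      intro st' j _
      simp [hQ, pvMatA]
    rw [hm, hfold, PySem.List.foldl_append_if, PySem.List.foldl_append_if, List.nil_append,
        List.nil_append]
    have hst := fun (k : Nat) (hk : k < N) =>
      pvOuter_spec Q N (List.range N) (List.replicate N 0) (List.replicate N 0) k hk
        (by simp) (by simp) (fun i hi => by simpa using hi)
    rw [Prod.mk.injEq]
    refine ⟨?_, ?_⟩
    · rw [hr, List.filter_map, List.filter_map]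
      congr 1
      congr 1
      apply List.filter_congr
      intro k hk
      simp only [List.mem_range] at hk
      obtain ⟨hsrc, -, -, -⟩ := hst k hk
      simp only [Function.comp_apply, Int.toNat_natCast]
      rw [hsrc, pvScanA_eq_all, List.all_map]
      simp only [List.getD_eq_getElem?_getD, List.getElem?_replicate, hk, if_pos,
        Option.getD_some, zero_add]
      rw [pv_len_beq_zero]
      simp [hQ, Function.comp_def]
    · rw [hr, List.filter_map, List.filter_map]
      congr 1
      congr 1
      apply List.filter_congr
      intro k hk
      simp only [List.mem_range] at hk
      obtain ⟨-, hsnk, -, -⟩ := hst k hk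
      simp only [Function.comp_apply, Int.toNat_natCast]
      rw [hsnk, pvScanA_eq_all, List.all_map]
      have hone : (List.range N).count k = 1 := by
        rw [List.Nodup.count List.nodup_range]
        simp [hk]
      rw [hone, List.countP_eq_length_filter]
      simp only [List.getD_eq_getElem?_getD, List.getElem?_replicate, hk, if_pos,
        Option.getD_some, zero_add, Nat.cast_one, one_mul]
      rw [pv_len_beq_zero]
      simp [hQ, Function.comp_def]
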